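-- pv_equiv track=rewrite | github.com/acrinym/AMrepo | am_pc_extract_fixed.py | sanitize_filename
-- ===== SOURCE A (Python) =====
-- def sanitize_filename(filename: str) -> str:
--     """Sanitize filename to be valid for Windows filesystem."""
--     # Remove or replace invalid characters
--     invalid_chars = '<>:"/\\|?*'
--     for char in invalid_chars:
--         filename = filename.replace(char, '_')
--
--     # Remove leading/trailing spaces and dots
--     filename = filename.strip(' .')
--
--     # Ensure filename isn't too long (Windows limit is 255 chars)
--     if len(filename) > 200:
--         filename = filename[:200]
--
--     # Ensure filename isn't empty
--     if not filename:
--         filename = "unknown"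
--
--     return filename
-- ===== SOURCE B (Python) =====
-- _INVALID = frozenset('<>:"/\\|?*')
-- _STRIP = ' .'
--
-- def sanitize_filename(filename: str) -> str:
--     """Sanitize filename to be valid for Windows filesystem.
--
--     Single membership-map pass over the characters, then a two-pointer
--     strip of spaces and dots from both ends combined with the 200-char truncation
--     in one final slice."""
--     chars = ['_' if c in _INVALID else c for c in filename]
--     i, j = 0, len(chars)
--     while i < j and chars[i] in _STRIP:
--         i += 1
--     while j > i and chars[j - 1] in _STRIP:
--         j -= 1
--     core = chars[i:min(j, i + 200)]
--     return ''.join(core) if core else "unknown"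
-- ===== Notes on version B (the rewrite author's own statement) =====
-- stated objective: alternative
-- what changed: One membership-map pass over the characters replaces A's eight sequential full-string .replace() scans, a two-pointer while-loop strip of leading/trailing spaces and dots replaces str.strip, and the strip and the 200-char truncation are fused into a single final slice chars[i:min(j,i+200)].
import Mathlib
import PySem

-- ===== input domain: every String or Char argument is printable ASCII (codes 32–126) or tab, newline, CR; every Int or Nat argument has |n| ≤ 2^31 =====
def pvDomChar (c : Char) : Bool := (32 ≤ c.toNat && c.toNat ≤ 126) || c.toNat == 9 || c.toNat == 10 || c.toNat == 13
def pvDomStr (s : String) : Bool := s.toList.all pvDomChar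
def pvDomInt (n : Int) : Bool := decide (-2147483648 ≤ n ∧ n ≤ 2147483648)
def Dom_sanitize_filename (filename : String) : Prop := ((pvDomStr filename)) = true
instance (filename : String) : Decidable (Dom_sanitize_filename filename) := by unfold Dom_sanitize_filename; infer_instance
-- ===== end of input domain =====

-- B does one membership-map pass instead of A's eight .replace() scans, strips spaces/dots with
-- two pointers instead of str.strip, and fuses strip and truncation into one slice;
-- objective: alternative. Return-value equivalence only (no mutation).

-- ===== PORT A =====
def sanitize_filename (filename : String) : String :=
  -- for char in '<>:"/\\|?*': filename = filename.replace(char, '_')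
  let f := ("<>:\"/\\|?*".toList).foldl
      (fun acc c => PySem.Str.replace acc (String.ofList [c]) "_") filename
  -- filename = filename.strip(' .')
  let f := PySem.Str.stripChars f " ."
  -- if len(filename) > 200: filename = filename[:200]
  let f := if PySem.Str.len f > 200 then PySem.Str.slice f none (some 200) else f
  -- if not filename: filename = "unknown"
  if PySem.Str.len f = 0 then "unknown" else f

-- ===== PORT B =====
-- the frozenset _INVALID and c in _INVALID
def bInvalidChars : List Char := "<>:\"/\\|?*".toList
def bInvalid (c : Char) : Bool := bInvalidChars.contains c

-- c in _STRIP
def bStrip (c : Char) : Bool := " .".toList.contains c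

-- while i < j and chars[i] in _STRIP: i += 1   (state: the suffix chars[i:])
def bAdvanceLeft : List Char → List Char
  | [] => []
  | c :: t => if bStrip c then bAdvanceLeft t else c :: t

-- while j > i and chars[j-1] in _STRIP: j -= 1  (state: the segment chars[i:j])
def bRetreatRight : List Char → List Char
  | [] => []
  | c :: t =>
    match bRetreatRight t with
    | [] => if bStrip c then [] else [c]
    | r => c :: r

def sanitize_filename_alt (filename : String) : String :=
  -- chars = ['_' if c in _INVALID else c for c in filename]
  let chars := filename.toList.map (fun c => if bInvalid c then '_' else c)
  -- the two pointer loops, then core = chars[i:min(j, i + 200)]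
  let core := (bRetreatRight (bAdvanceLeft chars)).take 200
  -- return ''.join(core) if core else "unknown"
  match core with
  | [] => "unknown"
  | _ => String.ofList core

-- ===== PRECONDITION & SPEC =====
def Spec_sanitize_filename (filename : String) (out : String) : Prop := out = sanitize_filename_alt filename
instance (filename : String) (out : String) : Decidable (Spec_sanitize_filename filename out) := by unfold Spec_sanitize_filename; infer_instance

-- ===== CLAIM (what is proved, stated in full; the proofs are below) =====
def Claim_equal_sanitize_filename : Prop := ∀ (filename : String), Dom_sanitize_filename filename → Spec_sanitize_filename filename (sanitize_filename filename)

-- ===== LEMMAS AND PROOFS =====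

-- Chars.replace with a single-char pattern and single-char replacement is a map.
lemma replace_go_single (a : Char) : ∀ (l : List Char) (fuel : Nat) (acc : List Char),
    l.length ≤ fuel →
    PySem.Chars.replace.go [a] ['_'] fuel l acc
      = acc.reverse ++ l.map (fun c => if c = a then '_' else c) := by
  intro l
  induction l with
  | nil =>
    intro fuel acc _
    cases fuel <;> simp [PySem.Chars.replace.go]
  | cons c t ih =>
    intro fuel acc h
    cases fuel with
    | zero => simp at h
    | succ n =>
      rw [PySem.Chars.replace.go]
      by_cases hc : c = a
      · subst hc
        simp only [List.isPrefixOf, BEq.rfl, Bool.true_and, if_pos]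
        have := ih n ('_' :: acc) (by simpa using h)
        simp only [List.length_cons, List.length_nil, List.drop_succ_cons, List.drop_zero,
          List.reverse_cons, List.reverse_nil, List.nil_append, List.singleton_append]
        rw [this]
        simp
      · have hpre : [a].isPrefixOf (c :: t) = false := by
          simp [List.isPrefixOf]
          exact fun h' => (hc h'.symm).elim
        rw [hpre]
        simp only [Bool.false_eq_true, if_false]
        rw [ih n (c :: acc) (by simpa using h)]
        simp [hc]

lemma replace_single (a : Char) (cs : List Char) :
    PySem.Chars.replace cs [a] ['_'] = cs.map (fun c => if c = a then '_' else c) := by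
  rw [PySem.Chars.replace]
  simp only [List.isEmpty_cons, Bool.false_eq_true, if_false]
  simpa using replace_go_single a cs cs.length [] le_rfl

-- one char through the nine-step replace chain equals one membership test
lemma chain_char_eq (c : Char) :
    (List.foldl (fun x a => if x = a then '_' else x) c "<>:\"/\\|?*".toList)
      = if bInvalid c then '_' else c := by
  have hl : "<>:\"/\\|?*".toList = ['<','>',':','"','/','\\','|','?','*'] := by decide
  rw [hl]
  by_cases h : bInvalid c = true
  · rw [if_pos h]
    have hmem : c ∈ ['<','>',':','"','/','\\','|','?','*'] := by
      simpa [bInvalid, bInvalidChars, hl] using h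
    fin_cases hmem <;> decide
  · rw [if_neg h]
    have hmem : c ∉ ['<','>',':','"','/','\\','|','?','*'] := by
      simp only [bInvalid, bInvalidChars, hl] at h
      simpa using h
    simp only [List.mem_cons, not_or] at hmem
    obtain ⟨n1,n2,n3,n4,n5,n6,n7,n8,n9,-⟩ := hmem
    simp [List.foldl, n1,n2,n3,n4,n5,n6,n7,n8,n9]

-- the eight-fold fold of single-char replaces equals B's single map
lemma fold_replace_eq_map (cs : List Char) :
    (("<>:\"/\\|?*".toList).foldl
        (fun acc c => PySem.Chars.replace acc [c] ['_']) cs)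
      = cs.map (fun c => if bInvalid c then '_' else c) := by
  have key : ∀ (chars : List Char) (l : List Char),
      List.foldl (fun acc c => PySem.Chars.replace acc [c] ['_']) l chars
        = l.map (fun x => List.foldl (fun x a => if x = a then '_' else x) x chars) := by
    intro chars
    induction chars with
    | nil => intro l; simp
    | cons a cs ih =>
      intro l
      rw [List.foldl_cons, replace_single, ih, List.map_map]
      apply List.map_congr_left
      intro x _
      simp [Function.comp]
  rw [key]
  exact List.map_congr_left (fun c _ => chain_char_eq c)

lemma stage1_eq (filename : String) :
    (("<>:\"/\\|?*".toList).foldl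
        (fun acc c => PySem.Str.replace acc (String.ofList [c]) "_") filename)
      = String.ofList (filename.toList.map (fun c => if bInvalid c then '_' else c)) := by
  apply String.ext
  rw [← fold_replace_eq_map filename.toList]
  have go : ∀ (chars : List Char) (f : String),
      (List.foldl (fun acc c => PySem.Str.replace acc (String.ofList [c]) "_") f chars).toList
        = List.foldl (fun acc c => PySem.Chars.replace acc [c] ['_']) f.toList chars := by
    intro chars
    induction chars with
    | nil => intro f; simp
    | cons c cs ih =>
      intro f
      simp only [List.foldl_cons]
      rw [ih]
      congr 1
      rw [PySem.Str.toList_replace]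
      simp
  rw [go]
  simp

lemma bAdvanceLeft_eq (l : List Char) : bAdvanceLeft l = l.dropWhile bStrip := by
  induction l with
  | nil => rfl
  | cons c t ih =>
    by_cases h : bStrip c = true <;> simp [bAdvanceLeft, List.dropWhile, h, ih]

lemma bRetreatRight_eq (l : List Char) :
    bRetreatRight l = (l.reverse.dropWhile bStrip).reverse := by
  induction l with
  | nil => rfl
  | cons c t ih =>
    simp only [bRetreatRight, List.reverse_cons, List.dropWhile_append]
    cases hb : bRetreatRight t with
    | nil =>
      have hd : List.dropWhile bStrip t.reverse = [] := by
        rw [ih] at hb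
        simpa using hb
      rw [hd]
      simp only [List.isEmpty_nil, if_true]
      cases hc : bStrip c <;> simp [List.dropWhile, hc]
    | cons y ys =>
      have hd : (List.dropWhile bStrip t.reverse).isEmpty = false := by
        rw [ih] at hb
        rcases hdd : List.dropWhile bStrip t.reverse with _ | ⟨z, zs⟩
        · rw [hdd] at hb; simp at hb
        · simp
      rw [hd]
      simp only [Bool.false_eq_true, if_false, List.reverse_append, List.reverse_cons,
        List.reverse_nil, List.nil_append, List.singleton_append]
      rw [← ih, hb]

-- strip(' .') is B's left-advance then right-retreat
lemma stripChars_eq (l : List Char) :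
    PySem.Chars.stripChars l (" .".toList) = bRetreatRight (bAdvanceLeft l) := by
  rw [PySem.Chars.stripChars, bRetreatRight_eq, bAdvanceLeft_eq]
  rfl

-- A's conditional truncation is take 200
lemma trunc_eq (s : String) :
    (if PySem.Str.len s > 200 then PySem.Str.slice s none (some 200) else s).toList
      = s.toList.take 200 := by
  by_cases h : PySem.Str.len s > 200
  · rw [if_pos h]
    rw [PySem.Str.slice]
    simp only [PySem.Chars.slice_eq_listSlice]
    rw [PySem.List.slice_to _ (by norm_num)]
    simp
  · rw [if_neg h]
    have hle : s.toList.length ≤ 200 := by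
      unfold PySem.Str.len at h
      omega
    rw [List.take_of_length_le hle]

-- the common tail: strip, truncate, default
lemma tail_eq (l : List Char) :
    (let f := PySem.Str.stripChars (String.ofList l) " .";
     let f := if PySem.Str.len f > 200 then PySem.Str.slice f none (some 200) else f;
     if PySem.Str.len f = 0 then "unknown" else f)
      = (match (bRetreatRight (bAdvanceLeft l)).take 200 with
         | [] => "unknown"
         | _ => String.ofList ((bRetreatRight (bAdvanceLeft l)).take 200)) := by
  show (if PySem.Str.len (if PySem.Str.len (PySem.Str.stripChars (String.ofList l) " .") > 200
          then PySem.Str.slice (PySem.Str.stripChars (String.ofList l) " .") none (some 200)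
          else PySem.Str.stripChars (String.ofList l) " .") = 0
        then "unknown"
        else (if PySem.Str.len (PySem.Str.stripChars (String.ofList l) " .") > 200
          then PySem.Str.slice (PySem.Str.stripChars (String.ofList l) " .") none (some 200)
          else PySem.Str.stripChars (String.ofList l) " .")) = _
  generalize ht : (if PySem.Str.len (PySem.Str.stripChars (String.ofList l) " .") > 200
      then PySem.Str.slice (PySem.Str.stripChars (String.ofList l) " .") none (some 200)
      else PySem.Str.stripChars (String.ofList l) " .") = t
  have h2 : (PySem.Str.stripChars (String.ofList l) " .").toList
      = bRetreatRight (bAdvanceLeft l) := by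
    rw [PySem.Str.toList_stripChars]
    rw [show (String.ofList l).toList = l by simp]
    exact stripChars_eq l
  have h3 : t.toList = (bRetreatRight (bAdvanceLeft l)).take 200 := by
    rw [← ht, trunc_eq, h2]
  cases hc : (bRetreatRight (bAdvanceLeft l)).take 200 with
  | nil =>
    have hz : PySem.Str.len t = 0 := by
      unfold PySem.Str.len
      rw [h3, hc]
      rfl
    rw [if_pos hz]
  | cons y ys =>
    have hnz : ¬ PySem.Str.len t = 0 := by
      unfold PySem.Str.len
      rw [h3, hc]
      simp only [List.length_cons]
      intro h0
      omega
    rw [if_neg hnz]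
    apply String.ext
    rw [h3, hc]
    simp

-- ===== VERDICT (by name: the statement is the Claim_ definition above) =====
theorem sanitize_filename_spec : Claim_equal_sanitize_filename := by
  intro filename _
  unfold Spec_sanitize_filename sanitize_filename sanitize_filename_alt
  rw [stage1_eq]
  have := tail_eq (filename.toList.map (fun c => if bInvalid c then '_' else c))
  simp only [] at this ⊢
  rw [this]
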